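-- pv_equiv track=rewrite | github.com/earthwuyang/aqd | make_gnn_labels.py | normalize_sql
-- ===== SOURCE A (Python) =====
-- def normalize_sql(s: str) -> str:
--     # Collapse whitespace to single spaces and lowercase all characters
--     out = []
--     in_space = False
--     for ch in s:
--         if ch.isspace():
--             if not in_space:
--                 out.append(' ')
--                 in_space = True
--         else:
--             out.append(ch.lower())
--             in_space = False
--     return ''.join(out)
-- ===== SOURCE B (Python) =====
-- def normalize_sql(s: str) -> str:
--     # Run-based scan: find each maximal run of same spaceness, emit a single space for a
--     # whitespace run and the lowercased slice for a non-space run of characters.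
--     parts = []
--     i, n = 0, len(s)
--     while i < n:
--         sp = s[i].isspace()
--         j = i + 1
--         while j < n and s[j].isspace() == sp:
--             j += 1
--         parts.append(' ' if sp else s[i:j].lower())
--         i = j
--     return ''.join(parts)
-- ===== Notes on version B (the rewrite author's own statement) =====
-- stated objective: alternative
-- what changed: Replaced the per-character in_space state machine with a run-based scan that finds each maximal run of equal spaceness and emits a single space or the lowercased run slice.
import Mathlib
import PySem

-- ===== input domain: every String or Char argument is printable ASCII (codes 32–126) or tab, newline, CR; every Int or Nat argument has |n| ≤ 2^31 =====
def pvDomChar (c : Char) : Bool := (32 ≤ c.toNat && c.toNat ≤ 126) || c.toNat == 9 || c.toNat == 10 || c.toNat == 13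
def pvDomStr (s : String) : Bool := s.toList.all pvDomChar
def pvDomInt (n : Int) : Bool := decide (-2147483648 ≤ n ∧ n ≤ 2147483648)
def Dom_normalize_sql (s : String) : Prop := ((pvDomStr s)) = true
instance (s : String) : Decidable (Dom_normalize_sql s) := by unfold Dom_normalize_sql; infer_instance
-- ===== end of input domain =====

-- B replaces A's per-character in_space state machine by a run-based scan (maximal runs of
-- equal spaceness, a single space per whitespace run, lowercased slice per word run); alternative, same cost.


-- ===== PORT A =====
-- foldl over the characters with state (out, in_space), exactly A's loop
def normalize_sql (s : String) : String :=
  let st := s.toList.foldl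
    (fun (st : List Char × Bool) ch =>
      if PySem.Chars.isspace ch then
        if !st.2 then (st.1 ++ [' '], true) else st
      else
        (st.1 ++ [PySem.Chars.lowerChar ch], false))
    ([], false)
  String.mk st.1

-- ===== PORT B =====
-- one step per maximal run: takeWhile = Source B's inner scan j, dropWhile = the advance i := j
def altRuns : List Char → List (List Char)
  | [] => []
  | c :: cs =>
    let sp := PySem.Chars.isspace c
    let run := (c :: cs).takeWhile (fun d => PySem.Chars.isspace d == sp)
    let rest := (c :: cs).dropWhile (fun d => PySem.Chars.isspace d == sp)
    (if sp then [' '] else run.map PySem.Chars.lowerChar) :: altRuns rest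
termination_by l => l.length
decreasing_by
  simp only [List.dropWhile_cons, beq_self_eq_true, if_true]
  exact Nat.lt_succ_of_le (List.length_dropWhile_le _ _)

def normalize_sql_alt (s : String) : String := String.mk (altRuns s.toList).flatten

-- ===== PRECONDITION & SPEC =====
def Spec_normalize_sql (s : String) (out : String) : Prop := out = normalize_sql_alt s
instance (s : String) (out : String) : Decidable (Spec_normalize_sql s out) := by unfold Spec_normalize_sql; infer_instance

-- ===== CLAIM (what is proved, stated in full; the proofs are below) =====
def Claim_equal_normalize_sql : Prop := ∀ (s : String), Dom_normalize_sql s → Spec_normalize_sql s (normalize_sql s)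

-- ===== LEMMAS AND PROOFS =====

-- reference per-character machine: output from state b
def N (b : Bool) : List Char → List Char
  | [] => []
  | c :: cs =>
    if PySem.Chars.isspace c then
      (if b then N true cs else ' ' :: N true cs)
    else PySem.Chars.lowerChar c :: N false cs

theorem foldA (cs : List Char) : ∀ (acc : List Char) (b : Bool),
    (cs.foldl
      (fun (st : List Char × Bool) ch =>
        if PySem.Chars.isspace ch then
          if !st.2 then (st.1 ++ [' '], true) else st
        else
          (st.1 ++ [PySem.Chars.lowerChar ch], false))
      (acc, b)).1 = acc ++ N b cs := by
  induction cs with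
  | nil => intro acc b; simp [N]
  | cons c cs ih =>
    intro acc b
    rw [List.foldl_cons]
    by_cases h : PySem.Chars.isspace c = true
    · cases b
      · rw [if_pos h]
        show (List.foldl _ (acc ++ [' '], true) cs).1 = acc ++ N false (c :: cs)
        rw [ih, N]; simp [h]
      · rw [if_pos h]
        show (List.foldl _ (acc, true) cs).1 = acc ++ N true (c :: cs)
        rw [ih, N]; simp [h]
    · rw [if_neg h]
      show (List.foldl _ (acc ++ [PySem.Chars.lowerChar c], false) cs).1 = acc ++ N b (c :: cs)
      rw [ih, N]; simp [h]

theorem N_true (cs : List Char) :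
    N true cs = N false (cs.dropWhile PySem.Chars.isspace) := by
  induction cs with
  | nil => simp [N]
  | cons c cs ih =>
    by_cases h : PySem.Chars.isspace c = true
    · simp [N, h, ih, List.dropWhile_cons]
    · simp [N, h, List.dropWhile_cons]

theorem N_false_word (cs : List Char) :
    N false cs =
      (cs.takeWhile (fun d => PySem.Chars.isspace d == false)).map PySem.Chars.lowerChar
        ++ N false (cs.dropWhile (fun d => PySem.Chars.isspace d == false)) := by
  induction cs with
  | nil => simp [N]
  | cons c cs ih =>
    by_cases h : PySem.Chars.isspace c = true
    · simp [List.takeWhile_cons, List.dropWhile_cons, h]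
    · simp [N, List.takeWhile_cons, List.dropWhile_cons, h, ih]

theorem altRuns_cons (c : Char) (cs : List Char) :
    altRuns (c :: cs) =
      (if PySem.Chars.isspace c then [' ']
       else ((c :: cs).takeWhile
          (fun d => PySem.Chars.isspace d == PySem.Chars.isspace c)).map PySem.Chars.lowerChar)
      :: altRuns ((c :: cs).dropWhile
          (fun d => PySem.Chars.isspace d == PySem.Chars.isspace c)) := by
  simp only [altRuns]

theorem altRuns_flatten (cs : List Char) : (altRuns cs).flatten = N false cs := by
  induction cs using altRuns.induct with
  | case1 => simp [altRuns, N]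
  | case2 c cs sp rest ih =>
    have ih' : (altRuns ((c :: cs).dropWhile
        (fun d => PySem.Chars.isspace d == PySem.Chars.isspace c))).flatten
        = N false ((c :: cs).dropWhile
            (fun d => PySem.Chars.isspace d == PySem.Chars.isspace c)) := ih
    rw [altRuns_cons, List.flatten_cons, ih']
    by_cases h : PySem.Chars.isspace c = true
    · have hp : (fun d => PySem.Chars.isspace d == PySem.Chars.isspace c)
          = PySem.Chars.isspace := by
        funext d; simp [h]
      rw [hp]
      simp only [h, if_true, List.dropWhile_cons, List.singleton_append]
      rw [← N_true]
      simp [N, h]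
    · have h' : PySem.Chars.isspace c = false := by simpa using h
      simp only [h', Bool.false_eq_true, if_false]
      rw [← N_false_word]

-- ===== VERDICT (by name: the statement is the Claim_ definition above) =====
theorem normalize_sql_spec : Claim_equal_normalize_sql := by
  intro s _
  show normalize_sql s = normalize_sql_alt s
  simp only [normalize_sql, normalize_sql_alt, altRuns_flatten, foldA, List.nil_append]
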